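-- pv_equiv track=rewrite | github.com/Meffazm/Algos-Datastructures | chess.py | minRooksLeft
-- ===== SOURCE A (Python) =====
-- def dfs(v, visited, graph):
--     visited[v] = True
--     for vertex in graph[v]:
--         if not visited[vertex]:
--             dfs(vertex, visited, graph)
--
-- def minRooksLeft(board_size, coordinates):
--     n = len(coordinates)
--     rooks_left = 0
--     adj_list = [[] for _ in range(n)]
--     visited = [False for _ in range(n)]
--
--     for i in range(n):
--         for j in range(n):
--             if i != j and (coordinates[i][0] == coordinates[j][0] or coordinates[i][1] == coordinates[j][1]):
--                 adj_list[i].append(j)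
--
--     for vertex in range(n):
--         if not visited[vertex]:
--             rooks_left += 1
--             dfs(vertex, visited, adj_list)
--
--     return rooks_left
-- ===== SOURCE B (Python) =====
-- def minRooksLeft(board_size, coordinates):
--     n = len(coordinates)
--     count = 0
--     visited = [False] * n
--     for s in range(n):
--         if not visited[s]:
--             count += 1
--             stack = [s]
--             while stack:
--                 v = stack.pop()
--                 if not visited[v]:
--                     visited[v] = True
--                     x, y = coordinates[v][0], coordinates[v][1]
--                     for u in range(n):
--                         if not visited[u] and (coordinates[u][0] == x or coordinates[u][1] == y):
--                             stack.append(u)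
--     return count
-- ===== Notes on version B (the rewrite author's own statement) =====
-- stated objective: faster
-- what changed: A builds an O(n^2) adjacency list and counts components by recursive DFS over it; B counts the same components with an explicit-stack flood fill that scans the coordinate list directly, building no graph and using no recursion (constant-factor speed-up: no adjacency-list allocation pass).
-- outside the precondition, e.g. on minRooksLeft(0, [[5], [5]]): A returns 1, B raises IndexError; on minRooksLeft(0, [[]]): A returns 1, B raises IndexError
import Mathlib
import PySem

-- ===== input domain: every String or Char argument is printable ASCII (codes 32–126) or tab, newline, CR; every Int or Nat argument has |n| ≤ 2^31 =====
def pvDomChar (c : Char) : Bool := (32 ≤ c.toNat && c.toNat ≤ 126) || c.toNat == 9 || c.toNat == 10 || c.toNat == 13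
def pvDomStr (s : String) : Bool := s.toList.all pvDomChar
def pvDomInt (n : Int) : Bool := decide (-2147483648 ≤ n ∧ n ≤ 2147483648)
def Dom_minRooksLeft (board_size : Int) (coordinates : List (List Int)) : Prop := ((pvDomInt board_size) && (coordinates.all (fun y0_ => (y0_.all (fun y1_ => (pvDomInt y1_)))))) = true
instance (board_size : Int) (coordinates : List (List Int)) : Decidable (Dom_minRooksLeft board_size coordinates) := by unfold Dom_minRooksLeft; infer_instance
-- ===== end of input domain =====

-- B replaces A's build-the-adjacency-list + recursive DFS by a single explicit-stack flood
-- fill that scans the coordinate list directly (no adjacency structure, no recursion); the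
-- theorem proves the returned component counts are equal on all inputs satisfying Pre_.

-- ===== PORT A =====
def pvCoord (cs : List (List Int)) (i k : Nat) : Int := (cs.getD i []).getD k 0

def pvAdjP (cs : List (List Int)) (i j : Nat) : Bool :=
  !(i == j) && (pvCoord cs i 0 == pvCoord cs j 0 || pvCoord cs i 1 == pvCoord cs j 1)

def pvBuildAdj (cs : List (List Int)) (n : Nat) : List (List Nat) :=
  (List.range n).foldl (fun adj i =>
    (List.range n).foldl (fun adj j =>
      if pvAdjP cs i j then adj.set i ((adj.getD i []) ++ [j]) else adj) adj)
    (List.replicate n [])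

mutual
def pvDfs (graph : List (List Nat)) (fuel : Nat) (v : Nat) (visited : List Bool) : List Bool :=
  match fuel with
  | 0 => visited
  | f+1 => pvDfsList graph f (graph.getD v []) (visited.set v true)
termination_by (fuel, 0)
def pvDfsList (graph : List (List Nat)) (fuel : Nat) (l : List Nat) (visited : List Bool) : List Bool :=
  match l with
  | [] => visited
  | u :: rest =>
    if visited.getD u false then pvDfsList graph fuel rest visited
    else pvDfsList graph fuel rest (pvDfs graph fuel u visited)
termination_by (fuel, l.length + 1)
end

def minRooksLeft (board_size : Int) (coordinates : List (List Int)) : Int :=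
  let n := coordinates.length
  let adj := pvBuildAdj coordinates n
  ((List.range n).foldl (fun (st : Int × List Bool) v =>
      if st.2.getD v false then st else (st.1 + 1, pvDfs adj (n + 1) v st.2))
    (0, List.replicate n false)).1

-- ===== PORT B =====
def pvCf (vis : List Bool) : Nat := vis.count false

theorem pvCf_set_lt (vis : List Bool) (v : Nat) (h : v < vis.length)
    (hv : vis.getD v false = false) : pvCf (vis.set v true) < pvCf vis := by
  induction vis generalizing v with
  | nil => simp at h
  | cons a as ih =>
    cases v with
    | zero => simp_all [pvCf]
    | succ v =>
      simp only [List.set_cons_succ, pvCf, List.count_cons]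
      have := ih v (by simpa using h) (by simpa using hv)
      simp [pvCf] at this; omega

def pvStackLoop (cs : List (List Int)) (n : Nat) (stack : List Nat) (vis : List Bool) : List Bool :=
  match stack with
  | [] => vis
  | v :: stack' =>
    if h : v < vis.length then
      if hv : vis.getD v false then pvStackLoop cs n stack' vis
      else
        pvStackLoop cs n
          ((List.range n).foldl (fun st u =>
            if !((vis.set v true).getD u false)
               && (pvCoord cs u 0 == pvCoord cs v 0 || pvCoord cs u 1 == pvCoord cs v 1)
            then u :: st else st) stack') (vis.set v true)
    else pvStackLoop cs n stack' vis
termination_by (pvCf vis, stack.length)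
decreasing_by
  · exact Prod.Lex.right _ (by simp)
  · exact Prod.Lex.left _ _ (by
      simpa using pvCf_set_lt vis v h (by simpa using hv))
  · exact Prod.Lex.right _ (by simp)

def minRooksLeft_alt (board_size : Int) (coordinates : List (List Int)) : Int :=
  let n := coordinates.length
  ((List.range n).foldl (fun (st : Int × List Bool) s =>
      if st.2.getD s false then st else (st.1 + 1, pvStackLoop coordinates n [s] st.2))
    (0, List.replicate n false)).1

-- ===== PRECONDITION & SPEC =====
-- Pre_ excludes coordinate entries with fewer than two components: on those A generally raises
-- IndexError (it returns only when the or-short-circuit hides the missing column), while B,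
-- which reads both components of a rook up front, raises there.
def Pre_minRooksLeft (board_size : Int) (coordinates : List (List Int)) : Prop :=
  ∀ c ∈ coordinates, 2 ≤ c.length
instance (board_size : Int) (coordinates : List (List Int)) : Decidable (Pre_minRooksLeft board_size coordinates) := by unfold Pre_minRooksLeft; infer_instance

def pvWitness_minRooksLeft : Int × List (List Int) := (8, [[0,0],[0,1],[2,2]])

def Spec_minRooksLeft (board_size : Int) (coordinates : List (List Int)) (out : Int) : Prop := out = minRooksLeft_alt board_size coordinates
instance (board_size : Int) (coordinates : List (List Int)) (out : Int) : Decidable (Spec_minRooksLeft board_size coordinates out) := by unfold Spec_minRooksLeft; infer_instance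

-- ===== CLAIM =====
def Claim_equal_minRooksLeft : Prop := ∀ (board_size : Int) (coordinates : List (List Int)), Dom_minRooksLeft board_size coordinates → Pre_minRooksLeft board_size coordinates → Spec_minRooksLeft board_size coordinates (minRooksLeft board_size coordinates)

-- ===== LEMMAS AND PROOFS =====

theorem pvGetD_set_self {α : Type} (l : List α) (i : Nat) (h : i < l.length) (x d : α) :
    (l.set i x).getD i d = x := by
  simp [List.getD_eq_getElem?_getD, h]

theorem pvGetD_set_ne {α : Type} (l : List α) {i k : Nat} (hne : k ≠ i) (x d : α) :
    (l.set i x).getD k d = l.getD k d := by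
  simp [List.getD_eq_getElem?_getD, List.getElem?_set_ne (by omega : i ≠ k)]

def visLe (a b : List Bool) : Prop := ∀ j, a.getD j false = true → b.getD j false = true

theorem visLe_refl (a : List Bool) : visLe a a := fun _ h => h

theorem visLe_trans {a b c : List Bool} (h1 : visLe a b) (h2 : visLe b c) : visLe a c :=
  fun j h => h2 j (h1 j h)

theorem visLe_set (vis : List Bool) (v : Nat) : visLe vis (vis.set v true) := by
  intro j hj
  by_cases hjv : j = v
  · subst hjv
    by_cases hl : j < vis.length
    · exact pvGetD_set_self vis j hl true false
    · rw [List.set_eq_of_length_le (by omega)]; exact hj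
  · rw [pvGetD_set_ne vis hjv]; exact hj

theorem getD_set_true_cases {vis : List Bool} {v j : Nat}
    (hj : (vis.set v true).getD j false = true) : j = v ∨ vis.getD j false = true := by
  by_cases hjv : j = v
  · exact Or.inl hjv
  · right; rwa [pvGetD_set_ne vis hjv] at hj

theorem getD_set_self_true {vis : List Bool} {v : Nat} (h : v < vis.length) :
    (vis.set v true).getD v false = true := pvGetD_set_self vis v h true false

theorem pvCf_pos {vis : List Bool} {v : Nat} (h : v < vis.length)
    (hv : vis.getD v false = false) : 0 < pvCf vis := by
  have : vis[v] = false := by rw [← List.getD_eq_getElem vis false h, hv]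
  have hmem : false ∈ vis := this ▸ vis.getElem_mem h
  exact List.count_pos_iff.mpr hmem

theorem pvCf_mono : ∀ (a b : List Bool), a.length = b.length → visLe a b → pvCf b ≤ pvCf a := by
  intro a
  induction a with
  | nil => intro b hlen _; cases b <;> simp_all [pvCf]
  | cons a0 as ih =>
    intro b hlen hle
    cases b with
    | nil => simp at hlen
    | cons b0 bs =>
      have htail : visLe as bs := by
        intro j hj
        have := hle (j+1)
        simp only [List.getD_cons_succ] at this
        exact this hj
      have hh := hle 0
      simp only [List.getD_cons_zero] at hh
      have hihs := ih bs (by simpa using hlen) htail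
      simp only [pvCf, List.count_cons] at hihs ⊢
      cases a0 <;> cases b0 <;> simp_all <;> omega

-- the edge relation of the rook graph
def pvE (cs : List (List Int)) (n : Nat) (i j : Nat) : Prop :=
  i < n ∧ j < n ∧ i ≠ j ∧ (pvCoord cs i 0 = pvCoord cs j 0 ∨ pvCoord cs i 1 = pvCoord cs j 1)

inductive pvReach (cs : List (List Int)) (n : Nat) (vis : List Bool) (v : Nat) : Nat → Prop where
  | refl : pvReach cs n vis v v
  | step {u w : Nat} : pvReach cs n vis v u → pvE cs n u w → vis.getD w false = false →
      pvReach cs n vis v w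

theorem pvReach_mono {cs n} {vis vis' : List Bool} {v j : Nat} (hle : visLe vis vis')
    (h : pvReach cs n vis' v j) : pvReach cs n vis v j := by
  induction h with
  | refl => exact pvReach.refl
  | step hR hE hw ih =>
    refine pvReach.step ih hE ?_
    cases hvw : vis.getD _ false
    · rfl
    · rw [hle _ hvw] at hw; exact hw.symm ▸ rfl

theorem pvReach_trans {cs n vis} {v u j : Nat} (h1 : pvReach cs n vis v u)
    (h2 : pvReach cs n vis u j) : pvReach cs n vis v j := by
  induction h2 with
  | refl => exact h1
  | step hR hE hw ih => exact pvReach.step ih hE hw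

theorem pvReach_unvis {cs n vis} {v j : Nat} (h : pvReach cs n vis v j) :
    j = v ∨ vis.getD j false = false := by
  cases h with
  | refl => exact Or.inl rfl
  | step hR hE hw => exact Or.inr hw

theorem innerFoldLen (cs : List (List Int)) (i : Nat) :
    ∀ (l : List Nat) (adj : List (List Nat)),
      (l.foldl (fun a j => if pvAdjP cs i j then a.set i ((a.getD i []) ++ [j]) else a) adj).length
        = adj.length := by
  intro l
  induction l with
  | nil => intro adj; rfl
  | cons j rest ih =>
    intro adj
    simp only [List.foldl_cons]
    by_cases hp : pvAdjP cs i j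
    · rw [if_pos hp, ih, List.length_set]
    · rw [if_neg hp, ih]

theorem innerFoldSlot (cs : List (List Int)) (i : Nat) :
    ∀ (l : List Nat) (adj : List (List Nat)), i < adj.length → ∀ k,
      ((l.foldl (fun a j => if pvAdjP cs i j then a.set i ((a.getD i []) ++ [j]) else a) adj).getD k [])
        = if k = i then adj.getD i [] ++ l.filter (fun j => pvAdjP cs i j) else adj.getD k [] := by
  intro l
  induction l with
  | nil => intro adj _ k; simp; intro h; rw [h]
  | cons j rest ih =>
    intro adj hi k
    simp only [List.foldl_cons, List.filter_cons]
    by_cases hp : pvAdjP cs i j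
    · rw [if_pos hp]
      have hlen : i < (adj.set i ((adj.getD i []) ++ [j])).length := by simpa using hi
      rw [ih _ hlen k]
      by_cases hk : k = i
      · subst hk
        rw [if_pos rfl, if_pos rfl, pvGetD_set_self _ _ hi, hp]
        simp
      · rw [if_neg hk, if_neg hk, pvGetD_set_ne _ hk]
    · rw [if_neg hp, ih _ hi k]
      simp [hp]

theorem outerFoldSlot (cs : List (List Int)) (n : Nat) :
    ∀ (l : List Nat) (adj : List (List Nat)), l.Nodup → (∀ i ∈ l, i < n) → adj.length = n → ∀ k,
      ((l.foldl (fun a i => (List.range n).foldl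
          (fun a j => if pvAdjP cs i j then a.set i ((a.getD i []) ++ [j]) else a) a) adj).getD k [])
        = if k ∈ l then adj.getD k [] ++ (List.range n).filter (fun j => pvAdjP cs k j)
          else adj.getD k [] := by
  intro l
  induction l with
  | nil => intro adj _ _ _ k; simp
  | cons i l' ih =>
    intro adj hnd hlt hlen k
    simp only [List.foldl_cons]
    have hi : i < adj.length := by rw [hlen]; exact hlt i (List.mem_cons_self ..)
    have hlen1 : ((List.range n).foldl
        (fun a j => if pvAdjP cs i j then a.set i ((a.getD i []) ++ [j]) else a) adj).length = n := by
      rw [innerFoldLen, hlen]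
    have hnotin : i ∉ l' := (List.nodup_cons.mp hnd).1
    rw [ih _ (List.nodup_cons.mp hnd).2 (fun x hx => hlt x (List.mem_cons_of_mem _ hx)) hlen1 k]
    by_cases hkl : k ∈ l'
    · have hki : k ≠ i := fun h => hnotin (h ▸ hkl)
      rw [if_pos hkl, if_pos (List.mem_cons_of_mem _ hkl), innerFoldSlot cs i _ _ hi k, if_neg hki]
    · by_cases hki : k = i
      · subst hki
        rw [if_neg hkl, if_pos (List.mem_cons_self ..), innerFoldSlot cs k _ _ hi k, if_pos rfl]
      · rw [if_neg hkl, if_neg (by simp [hki, hkl]), innerFoldSlot cs i _ _ hi k, if_neg hki]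

theorem pvBuildAdj_getD (cs : List (List Int)) (n : Nat) (k : Nat) :
    (pvBuildAdj cs n).getD k []
      = if k < n then (List.range n).filter (fun j => pvAdjP cs k j) else [] := by
  unfold pvBuildAdj
  rw [outerFoldSlot cs n (List.range n) _ (List.nodup_range)
      (fun i hi => List.mem_range.mp hi) (List.length_replicate)]
  have hrep : ∀ m, (List.replicate n ([] : List Nat)).getD m [] = [] := by
    intro m
    simp only [List.getD_eq_getElem?_getD, List.getElem?_replicate]
    split <;> rfl
  by_cases hk : k < n
  · rw [if_pos (List.mem_range.mpr hk), if_pos hk, hrep]; simp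
  · rw [if_neg (by simpa using hk), if_neg hk, hrep]

theorem pvBuildAdj_mem (cs : List (List Int)) (n : Nat) (i u : Nat) :
    u ∈ (pvBuildAdj cs n).getD i [] ↔ pvE cs n i u := by
  rw [pvBuildAdj_getD]
  by_cases hi : i < n
  · rw [if_pos hi]
    simp only [List.mem_filter, List.mem_range, pvAdjP, pvE, Bool.and_eq_true, Bool.or_eq_true,
      Bool.not_eq_eq_eq_not, Bool.not_true, beq_eq_false_iff_ne, beq_iff_eq]
    constructor
    · rintro ⟨hu, hne, hc⟩; exact ⟨hi, hu, hne, hc⟩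
    · rintro ⟨_, hu, hne, hc⟩; exact ⟨hu, hne, hc⟩
  · rw [if_neg hi]
    simp [pvE, hi]

theorem pvDfsList_nil (g : List (List Nat)) (f : Nat) (vis : List Bool) :
    pvDfsList g f [] vis = vis := by rw [pvDfsList]

theorem pvDfsList_cons (g : List (List Nat)) (f : Nat) (u : Nat) (rest : List Nat) (vis : List Bool) :
    pvDfsList g f (u :: rest) vis
      = if vis.getD u false then pvDfsList g f rest vis
        else pvDfsList g f rest (pvDfs g f u vis) := by rw [pvDfsList]

theorem pvDfs_succ (g : List (List Nat)) (f : Nat) (v : Nat) (vis : List Bool) :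
    pvDfs g (f+1) v vis = pvDfsList g f (g.getD v []) (vis.set v true) := by rw [pvDfs]

-- post-conditions of a search launched at v (resp. with worklist l) from state vis
def PostD (cs : List (List Int)) (n : Nat) (vis r : List Bool) (v : Nat) : Prop :=
  r.length = vis.length ∧ visLe vis r ∧ r.getD v false = true ∧
  (∀ j, r.getD j false = true → vis.getD j false = true ∨ pvReach cs n vis v j) ∧
  (∀ x w, r.getD x false = true → vis.getD x false = false → pvE cs n x w → r.getD w false = true)

def PostL (cs : List (List Int)) (n : Nat) (vis r : List Bool) (l : List Nat) : Prop :=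
  r.length = vis.length ∧ visLe vis r ∧ (∀ u ∈ l, r.getD u false = true) ∧
  (∀ j, r.getD j false = true → vis.getD j false = true ∨
      ∃ u ∈ l, vis.getD u false = false ∧ pvReach cs n vis u j) ∧
  (∀ x w, r.getD x false = true → vis.getD x false = false → pvE cs n x w → r.getD w false = true)

def PdfsP (cs : List (List Int)) (n : Nat) (graph : List (List Nat)) (fuel : Nat) : Prop :=
  ∀ v vis, v < n → vis.length = n → vis.getD v false = false → pvCf vis ≤ fuel →
    PostD cs n vis (pvDfs graph fuel v vis) v

def PlistP (cs : List (List Int)) (n : Nat) (graph : List (List Nat)) (fuel : Nat) : Prop :=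
  ∀ l vis, (∀ u ∈ l, u < n) → vis.length = n → pvCf vis ≤ fuel →
    PostL cs n vis (pvDfsList graph fuel l vis) l

theorem visLe_false {a b : List Bool} (h : visLe a b) {w : Nat}
    (hb : b.getD w false = false) : a.getD w false = false := by
  cases hw : a.getD w false
  · rfl
  · rw [h w hw] at hb; exact hb

theorem plistP_of {cs : List (List Int)} {n : Nat} {graph : List (List Nat)} {fuel : Nat}
    (hd : PdfsP cs n graph fuel) : PlistP cs n graph fuel := by
  intro l
  induction l with
  | nil =>
    intro vis _ _ _
    rw [pvDfsList_nil]
    exact ⟨rfl, visLe_refl _, by simp, fun j hj => Or.inl hj,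
      fun x w hx hnx _ => by rw [hnx] at hx; cases hx⟩
  | cons u rest ih =>
    intro vis hul hlen hcf
    rw [pvDfsList_cons]
    cases hvu : vis.getD u false with
    | true =>
      rw [if_pos rfl]
      obtain ⟨rl, rle, rmark, rsound, rclosed⟩ :=
        ih vis (fun x hx => hul x (List.mem_cons_of_mem _ hx)) hlen hcf
      refine ⟨rl, rle, ?_, ?_, rclosed⟩
      · intro x hx
        rcases List.mem_cons.mp hx with rfl | hx'
        · exact rle x hvu
        · exact rmark x hx'
      · intro j hj
        rcases rsound j hj with h | ⟨w, hw, hwf, hwr⟩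
        · exact Or.inl h
        · exact Or.inr ⟨w, List.mem_cons_of_mem _ hw, hwf, hwr⟩
    | false =>
      rw [if_neg (by simp)]
      obtain ⟨hl2, hle2, hmark2, hsound2, hclosed2⟩ :=
        hd u vis (hul u (List.mem_cons_self ..)) hlen hvu hcf
      have hlen2 : (pvDfs graph fuel u vis).length = n := hl2.trans hlen
      have hcf2 : pvCf (pvDfs graph fuel u vis) ≤ fuel :=
        le_trans (pvCf_mono vis _ hl2.symm hle2) hcf
      obtain ⟨rl, rle, rmark, rsound, rclosed⟩ :=
        ih (pvDfs graph fuel u vis) (fun x hx => hul x (List.mem_cons_of_mem _ hx)) hlen2 hcf2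
      refine ⟨rl.trans hl2, visLe_trans hle2 rle, ?_, ?_, ?_⟩
      · intro x hx
        rcases List.mem_cons.mp hx with rfl | hx'
        · exact rle x hmark2
        · exact rmark x hx'
      · intro j hj
        rcases rsound j hj with h | ⟨w, hw, hwf, hwr⟩
        · rcases hsound2 j h with h' | h'
          · exact Or.inl h'
          · exact Or.inr ⟨u, List.mem_cons_self .., hvu, h'⟩
        · exact Or.inr ⟨w, List.mem_cons_of_mem _ hw, visLe_false hle2 hwf, pvReach_mono hle2 hwr⟩
      · intro x w hx hnx hE
        cases hx2 : (pvDfs graph fuel u vis).getD x false with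
        | true => exact rle w (hclosed2 x w hx2 hnx hE)
        | false => exact rclosed x w hx hx2 hE

theorem pdfsP_succ {cs : List (List Int)} {n : Nat} {graph : List (List Nat)} {f : Nat}
    (hg : ∀ i u, u ∈ graph.getD i [] ↔ pvE cs n i u)
    (hl : PlistP cs n graph f) : PdfsP cs n graph (f+1) := by
  intro v vis hv hlen hvd hcf
  rw [pvDfs_succ]
  have hvlen : v < vis.length := by omega
  have hlen1 : (vis.set v true).length = n := by simpa using hlen
  have hcf1 : pvCf (vis.set v true) ≤ f := by
    have := pvCf_set_lt vis v hvlen hvd; omega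
  have hul : ∀ u ∈ graph.getD v [], u < n := fun u hu => ((hg v u).mp hu).2.1
  obtain ⟨rl, rle, rmark, rsound, rclosed⟩ := hl (graph.getD v []) (vis.set v true) hul hlen1 hcf1
  have hv1 : (vis.set v true).getD v false = true := getD_set_self_true hvlen
  have hlevis : visLe vis (vis.set v true) := visLe_set vis v
  refine ⟨by rw [rl]; simp, visLe_trans hlevis rle, rle v hv1, ?_, ?_⟩
  · intro j hj
    rcases rsound j hj with h | ⟨u, humem, hufalse, hureach⟩
    · rcases getD_set_true_cases h with rfl | h'
      · exact Or.inr pvReach.refl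
      · exact Or.inl h'
    · have hEvu := (hg v u).mp humem
      have hvuf : vis.getD u false = false := visLe_false hlevis hufalse
      exact Or.inr (pvReach_trans (pvReach.step pvReach.refl hEvu hvuf)
        (pvReach_mono hlevis hureach))
  · intro x w hx hnx hE
    cases hx1 : (vis.set v true).getD x false with
    | true =>
      have hxv : x = v := by
        rcases getD_set_true_cases hx1 with h | h
        · exact h
        · rw [h] at hnx; cases hnx
      subst hxv
      exact rmark w ((hg x w).mpr hE)
    | false => exact rclosed x w hx hx1 hE

theorem pdfsP_all {cs : List (List Int)} {n : Nat} {graph : List (List Nat)}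
    (hg : ∀ i u, u ∈ graph.getD i [] ↔ pvE cs n i u) :
    ∀ fuel, PdfsP cs n graph fuel ∧ PlistP cs n graph fuel := by
  intro fuel
  induction fuel with
  | zero =>
    have hd : PdfsP cs n graph 0 := by
      intro v vis hv hlen hvd hcf
      have := pvCf_pos (show v < vis.length by omega) hvd
      omega
    exact ⟨hd, plistP_of hd⟩
  | succ f ih =>
    have hd := pdfsP_succ hg ih.2
    exact ⟨hd, plistP_of hd⟩

theorem pvFoldPush_mem (P : Nat → Bool) (init : List Nat) (l : List Nat) (x : Nat) :
    x ∈ l.foldl (fun st u => if P u then u :: st else st) init ↔ x ∈ init ∨ (x ∈ l ∧ P x) := by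
  induction l generalizing init with
  | nil => simp
  | cons a t ih =>
    simp only [List.foldl_cons, ih]
    by_cases h : P a <;> simp [h]
    · constructor
      · rintro ((rfl|h1)|h1) <;> tauto
      · rintro (h1|⟨(rfl|h1),h2⟩) <;> tauto
    · constructor
      · rintro (h1|h1) <;> tauto
      · rintro (h1|⟨(rfl|h1),h2⟩) <;> tauto

theorem stackMain (cs : List (List Int)) (n : Nat) :
    ∀ (stack : List Nat) (vis : List Bool), vis.length = n → (∀ v ∈ stack, v < n) →
      PostL cs n vis (pvStackLoop cs n stack vis) stack := by
  intro stack vis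
  induction stack, vis using pvStackLoop.induct cs n with
  | case1 vis =>
    intro _ _
    rw [pvStackLoop]
    exact ⟨rfl, visLe_refl _, by simp, fun j hj => Or.inl hj,
      fun x w hx hnx _ => by rw [hnx] at hx; cases hx⟩
  | case2 vis v stack' h hv ih =>
    intro hlen hst
    rw [pvStackLoop]
    rw [dif_pos h, dif_pos hv]
    obtain ⟨rl, rle, rmark, rsound, rclosed⟩ :=
      ih hlen (fun x hx => hst x (List.mem_cons_of_mem _ hx))
    refine ⟨rl, rle, ?_, ?_, rclosed⟩
    · intro x hx
      rcases List.mem_cons.mp hx with rfl | hx'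
      · exact rle x hv
      · exact rmark x hx'
    · intro j hj
      rcases rsound j hj with h1 | ⟨w, hw, hwf, hwr⟩
      · exact Or.inl h1
      · exact Or.inr ⟨w, List.mem_cons_of_mem _ hw, hwf, hwr⟩
  | case3 vis v stack' h hv ih =>
    intro hlen hst
    rw [pvStackLoop, dif_pos h, dif_neg hv]
    have hvf : vis.getD v false = false := by
      cases hx : vis.getD v false
      · rfl
      · exact absurd hx hv
    have hvn : v < n := hst v (List.mem_cons_self ..)
    have hlen1 : (vis.set v true).length = n := by simpa using hlen
    have hv1 : (vis.set v true).getD v false = true := getD_set_self_true h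
    have hlevis : visLe vis (vis.set v true) := visLe_set vis v
    -- membership in the pushed stack
    have hmemS : ∀ x, x ∈ ((List.range n).foldl (fun st u =>
          if !((vis.set v true).getD u false)
             && (pvCoord cs u 0 == pvCoord cs v 0 || pvCoord cs u 1 == pvCoord cs v 1)
          then u :: st else st) stack')
        ↔ x ∈ stack' ∨ (x ∈ List.range n ∧
            (!((vis.set v true).getD x false)
             && (pvCoord cs x 0 == pvCoord cs v 0 || pvCoord cs x 1 == pvCoord cs v 1)) = true) := by
      intro x; exact pvFoldPush_mem _ stack' (List.range n) x
    simp only [dite_eq_ite] at ih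
    obtain ⟨rl, rle, rmark, rsound, rclosed⟩ := ih hlen1 (by
      intro x hx
      rcases (hmemS x).mp hx with hx' | ⟨hx', _⟩
      · exact hst x (List.mem_cons_of_mem _ hx')
      · exact List.mem_range.mp hx')
    refine ⟨by rw [rl]; simp, visLe_trans hlevis rle, ?_, ?_, ?_⟩
    · intro x hx
      rcases List.mem_cons.mp hx with rfl | hx'
      · exact rle x hv1
      · exact rmark x ((hmemS x).mpr (Or.inl hx'))
    · intro j hj
      rcases rsound j hj with h1 | ⟨u, humem, hufalse, hureach⟩
      · rcases getD_set_true_cases h1 with rfl | h2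
        · exact Or.inr ⟨j, List.mem_cons_self .., hvf, pvReach.refl⟩
        · exact Or.inl h2
      · rcases (hmemS u).mp humem with hu' | ⟨hu1, hu2⟩
        · exact Or.inr ⟨u, List.mem_cons_of_mem _ hu',
            visLe_false hlevis hufalse, pvReach_mono hlevis hureach⟩
        · -- u was pushed: an unvisited neighbour of v
          simp only [Bool.and_eq_true, Bool.not_eq_eq_eq_not, Bool.not_true, Bool.or_eq_true,
            beq_iff_eq] at hu2
          have huv : u ≠ v := by
            intro he; rw [he, hv1] at hu2; cases hu2.1
          have hEvu : pvE cs n v u :=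
            ⟨hvn, List.mem_range.mp hu1, fun he => huv he.symm, hu2.2.imp Eq.symm Eq.symm⟩
          have hvuf : vis.getD u false = false := visLe_false hlevis hu2.1
          exact Or.inr ⟨v, List.mem_cons_self .., hvf,
            pvReach_trans (pvReach.step pvReach.refl hEvu hvuf) (pvReach_mono hlevis hureach)⟩
    · intro x w hx hnx hE
      cases hx1 : (vis.set v true).getD x false with
      | false => exact rclosed x w hx hx1 hE
      | true =>
        have hxv : x = v := by
          rcases getD_set_true_cases hx1 with h2 | h2
          · exact h2
          · rw [h2] at hnx; cases hnx
        subst hxv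
        -- w is a neighbour of v: either already visited or pushed
        cases hw1 : (vis.set x true).getD w false with
        | true => exact rle w hw1
        | false =>
          have hwn : w < n := hE.2.1
          refine rmark w ((hmemS w).mpr (Or.inr ⟨List.mem_range.mpr hwn, ?_⟩))
          simp only [Bool.and_eq_true, Bool.not_eq_eq_eq_not, Bool.not_true, Bool.or_eq_true,
            beq_iff_eq]
          exact ⟨hw1, hE.2.2.2.imp Eq.symm Eq.symm⟩
  | case4 vis v stack' h ih =>
    intro hlen hst
    exact absurd (hst v (List.mem_cons_self ..)) (by omega)

theorem marked_iff {cs : List (List Int)} {n : Nat} {vis r : List Bool} {s : Nat}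
    (hv : vis.getD s false = false)
    (hmark : r.getD s false = true)
    (hle : visLe vis r)
    (hsound : ∀ j, r.getD j false = true → vis.getD j false = true ∨ pvReach cs n vis s j)
    (hclosed : ∀ x w, r.getD x false = true → vis.getD x false = false → pvE cs n x w →
      r.getD w false = true) :
    ∀ j, r.getD j false = true ↔ (vis.getD j false = true ∨ pvReach cs n vis s j) := by
  intro j
  constructor
  · exact hsound j
  · rintro (h | h)
    · exact hle j h
    · induction h with
      | refl => exact hmark
      | step hR hE hw ihh =>
        rcases pvReach_unvis hR with rfl | hu
        · exact hclosed _ _ hmark hv hE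
        · exact hclosed _ _ ihh hu hE

theorem componentEq (cs : List (List Int)) (n : Nat) (vis : List Bool) (s : Nat)
    (hlen : vis.length = n) (hs : s < n) (hv : vis.getD s false = false) :
    pvDfs (pvBuildAdj cs n) (n+1) s vis = pvStackLoop cs n [s] vis := by
  have hg : ∀ i u, u ∈ (pvBuildAdj cs n).getD i [] ↔ pvE cs n i u := pvBuildAdj_mem cs n
  have hcf : pvCf vis ≤ n + 1 := le_trans List.count_le_length (by omega)
  obtain ⟨d1, d2, d3, d4, d5⟩ := (pdfsP_all hg (n+1)).1 s vis hs hlen hv hcf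
  obtain ⟨l1, l2, l3, l4, l5⟩ := stackMain cs n [s] vis hlen
    (by intro x hx; simp at hx; omega)
  have hiff1 := marked_iff hv d3 d2 d4 d5
  have hiff2 := marked_iff hv (l3 s (List.mem_cons_self ..)) l2 (fun j hj => by
      rcases l4 j hj with h | ⟨u, hu, h1, h2⟩
      · exact Or.inl h
      · simp only [List.mem_singleton] at hu
        subst hu
        exact Or.inr h2) l5
  have hptw : ∀ j, (pvDfs (pvBuildAdj cs n) (n+1) s vis).getD j false
      = (pvStackLoop cs n [s] vis).getD j false := by
    intro j
    have hh := (hiff1 j).trans (hiff2 j).symm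
    cases h1 : (pvDfs (pvBuildAdj cs n) (n+1) s vis).getD j false <;>
        cases h2 : (pvStackLoop cs n [s] vis).getD j false
    · rfl
    · rw [h1, h2] at hh; simp at hh
    · rw [h1, h2] at hh; simp at hh
    · rfl
  apply List.ext_getElem (by rw [d1, l1])
  intro i h1 h2
  rw [← List.getD_eq_getElem _ false h1, ← List.getD_eq_getElem _ false h2]
  exact hptw i

theorem foldSame (cs : List (List Int)) :
    ∀ (l : List Nat) (cnt : Int) (vis : List Bool),
      vis.length = cs.length → (∀ s ∈ l, s < cs.length) →
      l.foldl (fun (st : Int × List Bool) v =>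
          if st.2.getD v false then st
          else (st.1 + 1, pvDfs (pvBuildAdj cs cs.length) (cs.length + 1) v st.2)) (cnt, vis)
        = l.foldl (fun (st : Int × List Bool) s =>
          if st.2.getD s false then st
          else (st.1 + 1, pvStackLoop cs cs.length [s] st.2)) (cnt, vis) := by
  intro l
  induction l with
  | nil => intros; rfl
  | cons s rest ih =>
    intro cnt vis hlen hl
    simp only [List.foldl_cons]
    by_cases hs : vis.getD s false = true
    · rw [if_pos hs, if_pos hs]
      exact ih cnt vis hlen (fun x hx => hl x (List.mem_cons_of_mem _ hx))
    · have hsf : vis.getD s false = false := by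
        cases h : vis.getD s false
        · rfl
        · exact absurd h hs
      rw [if_neg hs, if_neg hs,
        componentEq cs cs.length vis s hlen (hl s (List.mem_cons_self ..)) hsf]
      have hlen' : (pvStackLoop cs cs.length [s] vis).length = cs.length :=
        (stackMain cs cs.length [s] vis hlen
          (by intro x hx; simp only [List.mem_singleton] at hx; subst hx
              exact hl _ (List.mem_cons_self ..))).1.trans hlen
      exact ih (cnt + 1) _ hlen' (fun x hx => hl x (List.mem_cons_of_mem _ hx))

-- ===== VERDICT =====
theorem minRooksLeft_spec : Claim_equal_minRooksLeft := by
  unfold Claim_equal_minRooksLeft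
  intro board_size coordinates _ _
  unfold Spec_minRooksLeft minRooksLeft minRooksLeft_alt
  have := foldSame coordinates (List.range coordinates.length) 0
    (List.replicate coordinates.length false) (by simp)
    (fun s hs => List.mem_range.mp hs)
  simp only [this]
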